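-- pv_equiv track=rewrite | github.com/brandonpike/CheckersAgent | Agent.py | evaluate
-- ===== SOURCE A (Python) =====
-- def evaluate(piece, choices):
-- 	# returns a dict {maxValue:index}
-- 	value = {}
-- 	for i,choice in enumerate(choices):
-- 		val = 0
-- 		if abs(choice[1]-piece[1]) == 2:
-- 			val = 1
-- 		value[val] = i
--
-- 	return value
-- ===== SOURCE B (Python) =====
-- def evaluate(piece, choices):
--     # Map each move class (1 = jump: the row moves by 2, else 0) to the last
--     # choice index of that class; classes are keyed in order of first appearance.
--     classes = [1 if abs(c[1] - piece[1]) == 2 else 0 for c in choices]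
--     return {k: max(i for i, kk in enumerate(classes) if kk == k)
--             for k in dict.fromkeys(classes)}
-- ===== Notes on version B (the rewrite author's own statement) =====
-- stated objective: alternative
-- what changed: B replaces the dict-mutating index loop by a classify-once pass and a dict comprehension that maps each occurring class (in order of first appearance) to the maximum index at which it occurs.
import Mathlib
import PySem

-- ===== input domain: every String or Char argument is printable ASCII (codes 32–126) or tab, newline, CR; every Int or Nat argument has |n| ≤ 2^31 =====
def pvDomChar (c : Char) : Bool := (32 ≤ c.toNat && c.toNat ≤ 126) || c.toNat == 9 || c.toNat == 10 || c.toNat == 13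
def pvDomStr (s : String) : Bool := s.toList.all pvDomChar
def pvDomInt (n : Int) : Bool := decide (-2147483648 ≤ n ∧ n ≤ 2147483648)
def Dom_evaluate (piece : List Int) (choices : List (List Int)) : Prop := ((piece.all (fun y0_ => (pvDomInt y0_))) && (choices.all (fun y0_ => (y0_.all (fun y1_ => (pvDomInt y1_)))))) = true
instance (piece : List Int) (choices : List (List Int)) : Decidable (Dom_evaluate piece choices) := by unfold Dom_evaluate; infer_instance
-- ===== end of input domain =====

-- B builds the result dict by a classify-once pass and a comprehension (class ↦ max index
-- of that class) instead of a dict-mutating index loop (objective: alternative decomposition).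

-- ===== PORT A =====
def evaluate (piece : List Int) (choices : List (List Int)) : List (Int × Int) :=
  ((PySem.List.enumerate choices 0).foldl
      (fun value p =>
        let val : Int :=
          if (PySem.List.pyGetD p.2 1 0 - PySem.List.pyGetD piece 1 0).natAbs = 2 then 1 else 0
        value.insert val p.1)
      PySem.Dict.empty).items

-- ===== PORT B =====
def evaluate_alt (piece : List Int) (choices : List (List Int)) : List (Int × Int) :=
  let classes : List Int := choices.map (fun c =>
    if (PySem.List.pyGetD c 1 0 - PySem.List.pyGetD piece 1 0).natAbs = 2 then 1 else 0)
  (PySem.List.dedup classes).map (fun k =>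
    -- max(...) over the generator; it is nonempty for every k ∈ dedup classes, so the
    -- Python max never raises and the .getD 0 default is never taken
    (k, (PySem.List.max? (((PySem.List.enumerate classes 0).filter
            (fun p => p.2 == k)).map Prod.fst) (fun x => x)).getD 0))

-- ===== PRECONDITION & SPEC =====
-- Pre_: indexing choice[1] and piece[1] must be in range (A raises IndexError otherwise);
-- piece[1] is only read when the loop body runs, i.e. when choices is nonempty.
def Pre_evaluate (piece : List Int) (choices : List (List Int)) : Prop :=
  (choices ≠ [] → 2 ≤ piece.length) ∧ ∀ c ∈ choices, 2 ≤ c.length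
instance (piece : List Int) (choices : List (List Int)) : Decidable (Pre_evaluate piece choices) := by unfold Pre_evaluate; infer_instance
def pvWitness_evaluate : List Int × List (List Int) := ([0, 0], [[0, 2], [1, 1], [2, -2]])

def Spec_evaluate (piece : List Int) (choices : List (List Int)) (out : List (Int × Int)) : Prop := out = evaluate_alt piece choices
instance (piece : List Int) (choices : List (List Int)) (out : List (Int × Int)) : Decidable (Spec_evaluate piece choices out) := by unfold Spec_evaluate; infer_instance

-- ===== CLAIM (what is proved, stated in full; the proofs are below) =====
def Claim_equal_evaluate : Prop := ∀ (piece : List Int) (choices : List (List Int)), Dom_evaluate piece choices → Pre_evaluate piece choices → Spec_evaluate piece choices (evaluate piece choices)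

-- ===== LEMMAS AND PROOFS =====

-- running max of a list bounded by a stays bounded
theorem foldl_max_le (t : List Int) (x a : Int) (hx : x ≤ a) (h : ∀ y ∈ t, y ≤ a) :
    t.foldl max x ≤ a := by
  induction t generalizing x with
  | nil => simpa using hx
  | cons y t ih =>
      simp only [List.foldl]
      exact ih (max x y) (max_le hx (h y (by simp))) (fun z hz => h z (by simp [hz]))

-- Python max of L ++ [a] is a whenever every element of L is ≤ a
theorem max?_append_singleton (L : List Int) (a : Int) (h : ∀ y ∈ L, y ≤ a) :
    PySem.List.max? (L ++ [a]) (fun x => x) = some a := by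
  cases L with
  | nil => simp [PySem.List.max?_id_cons]
  | cons x t =>
      rw [List.cons_append, PySem.List.max?_id_cons, List.foldl_append]
      simp only [List.foldl]
      have : t.foldl max x ≤ a :=
        foldl_max_le t x a (h x (by simp)) (fun y hy => h y (by simp [hy]))
      simp [max_eq_right this]

-- B's per-key computation: the max index at which k occurs in xs, characterised through
-- the first occurrence of k in the reversed list
theorem max?_filter_enumerate (xs : List Int) (k : Int) (s : Int) :
    PySem.List.max? (((PySem.List.enumerate xs s).filter (fun p => p.2 == k)).map Prod.fst)
        (fun x => x) =
      match PySem.List.index? xs.reverse k with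
      | some j => some (s + ((xs.length : Int) - 1 - (j : Int)))
      | none => none := by
  induction xs using List.reverseRecOn with
  | nil => simp [PySem.List.enumerate, PySem.List.max?]
  | append_singleton xs x ih =>
      rw [PySem.List.enumerate_append]
      simp only [PySem.List.enumerate, List.filter_append, List.map_append, List.reverse_append,
        List.reverse_cons, List.reverse_nil, List.nil_append, List.cons_append]
      by_cases hx : x = k
      · subst hx
        rw [PySem.List.index?_cons_self]
        simp only [List.filter, beq_self_eq_true, List.map_cons, List.map_nil]
        rw [max?_append_singleton]
        · simp only [List.length_append, List.length_cons, List.length_nil]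
          congr 1
          push_cast
          ring
        · intro y hy
          simp only [List.mem_map, List.mem_filter] at hy
          obtain ⟨p, ⟨hp, _⟩, rfl⟩ := hy
          rw [PySem.List.mem_enumerate_iff] at hp
          obtain ⟨j, hj, rfl⟩ := hp
          simp only
          omega
      · rw [PySem.List.index?_cons_of_ne _ hx]
        have hfx : ((s + (xs.length : Int), x) :: []).filter (fun p => p.2 == k) = [] := by
          have hb : (x == k) = false := beq_eq_false_iff_ne.mpr hx
          simp [List.filter, hb]
        rw [hfx]
        simp only [List.map_nil, List.append_nil]
        cases h : PySem.List.index? xs.reverse k with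
        | none => rw [ih, h]; simp
        | some j =>
            rw [ih, h]
            simp only [Option.map_some, List.length_append, List.length_cons, List.length_nil]
            congr 1
            push_cast
            ring

-- A's insert loop over an enumerated list, looked up at k: the last index whose class is k,
-- read off through the first occurrence of k in the reversed class list.
theorem getD_foldl_insert_enum (xs : List (List Int)) (f : List Int → Int)
    (d : PySem.Dict Int Int) (s k : Int) :
    ((PySem.List.enumerate xs s).foldl (fun d p => d.insert (f p.2) p.1) d).getD k 0 =
      match PySem.List.index? (xs.map f).reverse k with
      | some j => s + ((xs.length : Int) - 1 - (j : Int))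
      | none => d.getD k 0 := by
  induction xs using List.reverseRecOn generalizing d with
  | nil => simp [PySem.List.enumerate]
  | append_singleton xs x ih =>
      rw [PySem.List.enumerate_append, List.foldl_append]
      simp only [PySem.List.enumerate, List.foldl]
      by_cases hx : f x = k
      · subst hx
        rw [PySem.Dict.getD_insert]
        simp only [List.map_append, List.reverse_append, List.map_cons, List.map_nil,
          List.reverse_cons, List.reverse_nil, List.nil_append, List.cons_append,
          PySem.List.index?_cons_self]
        simp
      · rw [PySem.Dict.getD_insert, if_neg (by exact fun h => hx h.symm), ih]
        simp only [List.map_append, List.reverse_append, List.map_cons, List.map_nil,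
          List.reverse_cons, List.reverse_nil, List.nil_append, List.cons_append]
        rw [PySem.List.index?_cons_of_ne _ hx]
        cases PySem.List.index? (xs.map f).reverse k with
        | none => simp
        | some j =>
            simp only [Option.map_some, List.length_append, List.length_cons, List.length_nil]
            push_cast
            ring

theorem evaluate_eq (piece : List Int) (choices : List (List Int)) :
    evaluate piece choices = evaluate_alt piece choices := by
  unfold evaluate evaluate_alt
  set f : List Int → Int := fun c =>
    if (PySem.List.pyGetD c 1 0 - PySem.List.pyGetD piece 1 0).natAbs = 2 then 1 else 0 with hf
  set d := (PySem.List.enumerate choices 0).foldl (fun d p => d.insert (f p.2) p.1)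
      PySem.Dict.empty with hd
  have hnd : d.keys.Nodup := by
    rw [hd]
    exact PySem.Dict.nodup_keys_foldl_insert_key _ _ _ _ (by simp [PySem.Dict.keys_empty])
  have hmapf : (PySem.List.enumerate choices 0).map (fun p => f p.2) = choices.map f := by
    conv_rhs => rw [← PySem.List.map_snd_enumerate choices 0]
    rw [List.map_map]
    rfl
  have hkeys : d.keys = PySem.Set.ofList (choices.map f) := by
    rw [hd, PySem.Dict.keys_foldl_insert_key, hmapf]
    simp [PySem.Dict.keys_empty, PySem.Set.update_nil_left]
  show d.items = _
  rw [PySem.Dict.items_eq_map_keys d hnd 0, hkeys]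
  simp only [PySem.List.dedup_eq_ofList]
  apply List.map_congr_left
  intro k hk
  have hkmem : k ∈ choices.map f := (PySem.Set.mem_ofList _ _).1 hk
  obtain ⟨j, hj⟩ : ∃ j, PySem.List.index? (choices.map f).reverse k = some j := by
    have := (PySem.List.index?_isSome_iff (v := k) (xs := (choices.map f).reverse)).2
      (by simpa using hkmem)
    exact Option.isSome_iff_exists.1 this
  have hgd := getD_foldl_insert_enum choices f PySem.Dict.empty 0 k
  rw [← hd, hj] at hgd
  rw [hgd, max?_filter_enumerate (choices.map f) k 0, hj]
  refine congrArg (Prod.mk k) ?_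
  simp only [Option.getD_some, List.length_map]

-- ===== VERDICT (by name: the statement is the Claim_ definition above) =====
theorem evaluate_spec : Claim_equal_evaluate := by
  intro piece choices _ _
  exact evaluate_eq piece choices
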